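-- pv_equiv track=rewrite | github.com/Thernn88/SAPPHYRE | Merge.py | calculate_split
-- ===== SOURCE A (Python) =====
-- def get_start_end(sequence: str) -> tuple:
--     """
--     Returns index of first and last none dash character in sequence.
--     """
--     start = None
--     end = None
--     for i,character in enumerate(sequence):
--         if character != '-':
--             start = i
--             break
--     for i in range(len(sequence)-1, -1, -1):
--         if sequence[i] != '-':
--             end = i
--             break
--     return (start,end)
--
-- def find_overlap(tuple_a: tuple, tuple_b: tuple) -> tuple:
--     """
--     Takes two start/end pairs and returns the overlap.
--     """
--     start = max(tuple_a[0], tuple_b[0])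
--     end = min(tuple_a[1], tuple_b[1])
--     if end - start < 0:
--         return None, None
--     return start, end
--
-- def calculate_split(sequence_a: str, sequence_b: str, comparison_sequence: str) -> int:
--     """
--     Iterates over each position in the overlap range of sequence A and sequence B and
--     creates a frankenstein sequence of sequence A + Sequence B joined at each
--     position in the overlap.
--
--     Final split position = pos in overlap with highest score.
--
--     Score is determined by the amount of characters that are the same between each
--     position in the frankenstein sequence and the comparison sequence.
--     """
--
--     pair_a = get_start_end(sequence_a)
--     pair_b = get_start_end(sequence_b)
--
--
--     # set_a = set(range(start_a,end_a+1))
--     # set_b = set(range(start_b,end_b+1))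
--
--     # overlap_set = set_a.intersection(set_b)
--
--     # overlap_positions = list(overlap_set)
--     # overlap_positions.sort() #Sort ascending
--
--     # overlap_start = overlap_positions[0]
--     # overlap_end = overlap_positions[-1]
--     overlap_start, overlap_end = find_overlap(pair_a, pair_b)
--
--
--
--     sequence_a_overlap = sequence_a[overlap_start:overlap_end+1]
--     sequence_b_overlap = sequence_b[overlap_start:overlap_end+1]
--     comparison_overlap = comparison_sequence[overlap_start:overlap_end+1]
--
--     highest_score = 0
--     base_score = 0
--     highest_scoring_pos = 0
--
--     for i, character in enumerate(sequence_b_overlap):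
--         if character == comparison_overlap[i]:
--             base_score += 1
--     highest_score = base_score
--
--     for i, character_a in enumerate(sequence_a_overlap):
--         if sequence_b_overlap[i] == comparison_overlap[i]:
--             base_score -= 1
--         if character_a == comparison_overlap[i]:
--             base_score += 1
--         if base_score >= highest_score:
--             highest_score = base_score
--             highest_scoring_pos = i
--     return highest_scoring_pos + overlap_start
-- ===== SOURCE B (Python) =====
-- def _bounds(sequence):
--     positions = [i for i, ch in enumerate(sequence) if ch != '-']
--     return positions[0], positions[-1]
--
-- def calculate_split(sequence_a: str, sequence_b: str, comparison_sequence: str) -> int: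
--     start_a, end_a = _bounds(sequence_a)
--     start_b, end_b = _bounds(sequence_b)
--     overlap_start = max(start_a, start_b)
--     overlap_end = min(end_a, end_b)
--     a = sequence_a[overlap_start:overlap_end + 1]
--     b = sequence_b[overlap_start:overlap_end + 1]
--     c = comparison_sequence[overlap_start:overlap_end + 1]
--     pairs_b = list(zip(b, c))
--     # suffix[i] = number of positions j >= i with b[j] == c[j]
--     suffix = [0] * (len(pairs_b) + 1)
--     for i in range(len(pairs_b) - 1, -1, -1):
--         suffix[i] = suffix[i + 1] + (pairs_b[i][0] == pairs_b[i][1])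
--     best = suffix[0]
--     best_pos = 0
--     prefix = 0
--     for i, (ca, cc) in enumerate(zip(a, c)):
--         prefix += (ca == cc)
--         score = prefix + suffix[i + 1]
--         if score >= best:
--             best = score
--             best_pos = i
--     return best_pos + overlap_start
-- ===== Notes on version B (the rewrite author's own statement) =====
-- stated objective: alternative
-- what changed: A seeds one mutable running score with the all-B score and subtract/adds it across the overlap; B instead precomputes a suffix table of B-matches and a prefix count of A-matches so each split score prefix[i]+suffix[i+1] is computed independently, with the same last-argmax tie-break.
import Mathlib
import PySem

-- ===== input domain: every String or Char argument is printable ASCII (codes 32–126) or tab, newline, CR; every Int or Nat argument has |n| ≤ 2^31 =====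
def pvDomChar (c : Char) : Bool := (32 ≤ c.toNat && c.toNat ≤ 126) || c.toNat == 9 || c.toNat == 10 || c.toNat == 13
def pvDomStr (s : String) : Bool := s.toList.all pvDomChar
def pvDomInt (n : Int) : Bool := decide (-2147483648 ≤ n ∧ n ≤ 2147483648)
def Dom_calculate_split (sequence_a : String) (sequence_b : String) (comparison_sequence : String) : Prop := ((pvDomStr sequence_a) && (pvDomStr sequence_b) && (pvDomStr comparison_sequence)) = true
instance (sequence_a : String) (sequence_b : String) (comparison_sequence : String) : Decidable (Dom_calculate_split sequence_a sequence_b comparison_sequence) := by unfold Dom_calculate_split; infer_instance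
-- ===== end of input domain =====

-- B replaces A's mutating running-score scan by a suffix-match table plus a prefix scan (objective: alternative, same value).

-- ===== PORT A =====
-- get_start_end, first loop: first index whose character is not '-'
def pvGseStart : List Char → Nat → Option Nat
  | [], _ => none
  | c :: rest, i => if c != '-' then some i else pvGseStart rest (i + 1)

-- get_start_end, second loop: scans indices k-1, k-2, …, 0 (k starts at len(sequence));
-- indices are always in range in A, so getD is exact there
def pvGseEnd (s : List Char) : Nat → Option Nat
  | 0 => none
  | k + 1 => if s.getD k ' ' != '-' then some k else pvGseEnd s k

-- first loop of calculate_split: base_score over enumerate(sequence_b_overlap);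
-- comparison_overlap[i] is in range on every input Pre_ admits, so getD is exact there
def pvBaseLoop (cOv : List Char) : List Char → Nat → Int → Int
  | [], _, acc => acc
  | ch :: rest, i, acc =>
      pvBaseLoop cOv rest (i + 1) (if ch == cOv.getD i ' ' then acc + 1 else acc)

-- second loop of calculate_split: state (base_score, highest_score, highest_scoring_pos)
def pvMainLoop (bOv cOv : List Char) : List Char → Nat → Int × Int × Int → Int × Int × Int
  | [], _, st => st
  | ch :: rest, i, (base, high, pos) =>
      let base1 := if bOv.getD i ' ' == cOv.getD i ' ' then base - 1 else base
      let base2 := if ch == cOv.getD i ' ' then base1 + 1 else base1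
      if base2 ≥ high then pvMainLoop bOv cOv rest (i + 1) (base2, base2, (i : Int))
      else pvMainLoop bOv cOv rest (i + 1) (base2, high, pos)

def calculate_split (sequence_a : String) (sequence_b : String) (comparison_sequence : String) : Int :=
  let la := sequence_a.toList
  let lb := sequence_b.toList
  let lc := comparison_sequence.toList
  match pvGseStart la 0, pvGseEnd la la.length, pvGseStart lb 0, pvGseEnd lb lb.length with
  | some sa, some ea, some sb, some eb =>
      let ovS := max sa sb
      let ovE := min ea eb
      if (ovE : Int) - (ovS : Int) < 0 then 0  -- Python raises here (slicing None); excluded by Pre_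
      else
        let aOv := PySem.List.slice la (some (ovS : Int)) (some ((ovE : Int) + 1))
        let bOv := PySem.List.slice lb (some (ovS : Int)) (some ((ovE : Int) + 1))
        let cOv := PySem.List.slice lc (some (ovS : Int)) (some ((ovE : Int) + 1))
        let base := pvBaseLoop cOv bOv 0 0
        let st := pvMainLoop bOv cOv aOv 0 (base, base, 0)
        st.2.2 + (ovS : Int)
  | _, _, _, _ => 0  -- Python raises here (max/min over None); excluded by Pre_

-- ===== PORT B =====
-- _bounds: positions = [i for i, ch in enumerate(sequence) if ch != '-']
def pvPositions (s : List Char) : List Int :=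
  ((PySem.List.enumerate s).filter (fun p => p.2 != '-')).map Prod.fst

-- positions[0], positions[-1]; Python raises IndexError on the empty list (none here; excluded by Pre_)
def pvBoundsB (s : List Char) : Option (Int × Int) :=
  (pvPositions s).head?.bind fun f => (pvPositions s).getLast?.map fun l => (f, l)

-- suffix table of Source B built from the right: suffix[i] = suffix[i+1] + (b[i] == c[i])
def pvMkSuffix : List (Char × Char) → List Int
  | [] => [0]
  | p :: rest =>
      let t := pvMkSuffix rest
      ((if p.1 == p.2 then 1 else 0) + t.headI) :: t

-- second loop of Source B: prefix scan over zip(a, c), consuming the suffix table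
def pvScan : List (Char × Char) → List Int → Int → Int → Int → Nat → Int
  | [], _, _, _, bestPos, _ => bestPos
  | p :: rest, suf, pre, best, bestPos, i =>
      let pre' := pre + (if p.1 == p.2 then 1 else 0)
      let score := pre' + suf.headI
      if score ≥ best then pvScan rest suf.tail pre' score (i : Int) (i + 1)
      else pvScan rest suf.tail pre' best bestPos (i + 1)

def calculate_split_alt (sequence_a : String) (sequence_b : String) (comparison_sequence : String) : Int :=
  let la := sequence_a.toList
  let lb := sequence_b.toList
  let lc := comparison_sequence.toList
  -- Option.elim: the none case is where Python's _bounds raises IndexError; excluded by Pre_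
  (pvBoundsB la).elim 0 fun pa =>
    (pvBoundsB lb).elim 0 fun pb =>
      let ovS := max pa.1 pb.1
      let ovE := min pa.2 pb.2
      let aOv := PySem.List.slice la (some ovS) (some (ovE + 1))
      let bOv := PySem.List.slice lb (some ovS) (some (ovE + 1))
      let cOv := PySem.List.slice lc (some ovS) (some (ovE + 1))
      let suffix := pvMkSuffix (bOv.zip cOv)
      pvScan (aOv.zip cOv) suffix.tail 0 suffix.headI 0 0 + ovS

-- ===== PRECONDITION & SPEC =====
-- first / last non-'-' index of a string (closed form, used only by Pre_)
def pvFirstND (s : List Char) : Nat := s.findIdx (fun c => c != '-')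
def pvLastND (s : List Char) : Nat := s.length - 1 - s.reverse.findIdx (fun c => c != '-')

-- Pre_ excludes exactly the inputs where the Python A raises: a or b all dashes (TypeError on
-- max/min of None), empty overlap (TypeError slicing None), or comparison_sequence too short
-- to cover the overlap (IndexError).
def Pre_calculate_split (sequence_a : String) (sequence_b : String) (comparison_sequence : String) : Prop :=
  sequence_a.toList.any (fun c => c != '-') = true ∧
  sequence_b.toList.any (fun c => c != '-') = true ∧
  max (pvFirstND sequence_a.toList) (pvFirstND sequence_b.toList)
    ≤ min (pvLastND sequence_a.toList) (pvLastND sequence_b.toList) ∧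
  min (pvLastND sequence_a.toList) (pvLastND sequence_b.toList) + 1 ≤ comparison_sequence.toList.length
instance (sequence_a : String) (sequence_b : String) (comparison_sequence : String) : Decidable (Pre_calculate_split sequence_a sequence_b comparison_sequence) := by unfold Pre_calculate_split; infer_instance

def pvWitness_calculate_split : String × String × String := ("ab-", "-ba", "aba")

def Spec_calculate_split (sequence_a : String) (sequence_b : String) (comparison_sequence : String) (out : Int) : Prop := out = calculate_split_alt sequence_a sequence_b comparison_sequence
instance (sequence_a : String) (sequence_b : String) (comparison_sequence : String) (out : Int) : Decidable (Spec_calculate_split sequence_a sequence_b comparison_sequence out) := by unfold Spec_calculate_split; infer_instance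

-- ===== CLAIM (what is proved, stated in full; the proofs are below) =====
def Claim_equal_calculate_split : Prop := ∀ (sequence_a : String) (sequence_b : String) (comparison_sequence : String), Dom_calculate_split sequence_a sequence_b comparison_sequence → Pre_calculate_split sequence_a sequence_b comparison_sequence → Spec_calculate_split sequence_a sequence_b comparison_sequence (calculate_split sequence_a sequence_b comparison_sequence)

-- ===== LEMMAS AND PROOFS =====

def pvMatches : List (Char × Char) → Int
  | [] => 0
  | p :: r => (if p.1 == p.2 then 1 else 0) + pvMatches r

theorem pvMkSuffix_headI (z : List (Char × Char)) : (pvMkSuffix z).headI = pvMatches z := by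
  induction z with
  | nil => simp [pvMkSuffix, pvMatches]
  | cons p r ih => simp [pvMkSuffix, pvMatches, ih]

theorem pvGseStart_eq (s : List Char) (i : Nat) :
    pvGseStart s i = if s.any (fun c => c != '-') then some (i + s.findIdx (fun c => c != '-')) else none := by
  induction s generalizing i with
  | nil => simp [pvGseStart]
  | cons c rest ih =>
      by_cases h : (c != '-') = true
      · simp [pvGseStart, h, List.findIdx_cons]
      · have h' : (c != '-') = false := by simpa using h
        simp [pvGseStart, h', List.findIdx_cons, ih]
        split_ifs with h2
        · congr 1
          omega
        · rfl

theorem pvPositions_head (s : List Char) (k : Int) :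
    ((((PySem.List.enumerate s k).filter (fun p => p.2 != '-')).map Prod.fst)).head?
      = if s.any (fun c => c != '-') then some (k + (s.findIdx (fun c => c != '-') : Int)) else none := by
  induction s generalizing k with
  | nil => simp [PySem.List.enumerate]
  | cons c rest ih =>
      by_cases h : (c != '-') = true
      · simp [PySem.List.enumerate, h, List.findIdx_cons]
      · have h' : (c != '-') = false := by simpa using h
        simp [PySem.List.enumerate, h', List.findIdx_cons, ih]
        split_ifs with h2
        · congr 1
          ring
        · rfl

theorem pvEnumerate_append (t u : List Char) (k : Int) :
    PySem.List.enumerate (t ++ u) k = PySem.List.enumerate t k ++ PySem.List.enumerate u (k + t.length) := by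
  induction t generalizing k with
  | nil => simp [PySem.List.enumerate]
  | cons c rest ih =>
      simp only [List.cons_append, PySem.List.enumerate, ih, List.length_cons, List.cons.injEq,
        true_and]
      congr 2
      push_cast
      ring

theorem pvPositions_getLast (s : List Char) :
    (pvPositions s).getLast?
      = if s.any (fun c => c != '-') then
          some ((s.length : Int) - 1 - (s.reverse.findIdx (fun c => c != '-') : Int))
        else none := by
  induction s using List.reverseRecOn with
  | nil => simp [pvPositions, PySem.List.enumerate]
  | append_singleton t c ih =>
      unfold pvPositions at *
      rw [pvEnumerate_append]
      by_cases h : (c != '-') = true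
      · simp [PySem.List.enumerate, h, List.reverse_append, List.findIdx_cons,
          List.getLast?_append]
      · have h' : (c != '-') = false := by simpa using h
        simp [PySem.List.enumerate, h', List.reverse_append, List.findIdx_cons, ih]
        split_ifs with h2
        · congr 1
          ring
        · rfl

theorem pvGseEnd_prefix (t : List Char) (c : Char) (k : Nat) (hk : k ≤ t.length) :
    pvGseEnd (t ++ [c]) k = pvGseEnd t k := by
  induction k with
  | zero => simp [pvGseEnd]
  | succ k ih =>
      have hget : (t ++ [c])[k]? = t[k]? := by
        have hk' : k < t.length := by omega
        exact List.getElem?_append_left hk'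
      simp [pvGseEnd, List.getD, hget, ih (by omega)]

theorem pvGseEnd_eq (s : List Char) :
    pvGseEnd s s.length
      = if s.any (fun c => c != '-') then some (s.length - 1 - s.reverse.findIdx (fun c => c != '-')) else none := by
  induction s using List.reverseRecOn with
  | nil => simp [pvGseEnd]
  | append_singleton t c ih =>
      have hlen : (t ++ [c]).length = t.length + 1 := by simp
      rw [hlen]
      have hget : (t ++ [c])[t.length]? = some c := by
        rw [List.getElem?_append_right (le_refl t.length)]
        simp
      by_cases h : (c != '-') = true
      · simp [pvGseEnd, List.getD, h, List.reverse_append, List.findIdx_cons]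
      · simp only [Bool.not_eq_true] at h
        simp only [pvGseEnd, List.getD, hget, Option.getD_some, h]
        rw [pvGseEnd_prefix t c t.length (le_refl _), ih]
        simp [List.reverse_append, List.findIdx_cons, h]
        split_ifs with h2
        · congr 1
          have : t.reverse.findIdx (fun c => c != '-') < t.length := by
            have := List.findIdx_lt_length (p := fun c => c != '-') (xs := t.reverse)
            simp only [List.length_reverse] at this
            rw [this]
            simpa [List.any_eq_true] using h2
          omega
        · rfl

theorem pvBaseLoop_eq (cF : List Char) (tb tc : List Char) (i : Nat) (acc : Int)
    (htc : tc = cF.drop i) (hlen : tb.length = tc.length) :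
    pvBaseLoop cF tb i acc = acc + pvMatches (tb.zip tc) := by
  induction tb generalizing tc i acc with
  | nil => simp [pvBaseLoop, pvMatches]
  | cons ch rest ih =>
      match tc, hlen with
      | cc :: tc', hlen =>
        have hget : cF.getD i ' ' = cc := by
          have : cF[i]? = some cc := by
            have h0 : (cF.drop i)[0]? = some cc := by rw [← htc]; rfl
            rw [List.getElem?_drop] at h0; simpa using h0
          simp [List.getD, this]
        have hdrop : tc' = cF.drop (i + 1) := by
          rw [← List.tail_drop, ← htc, List.tail_cons]
        simp only [pvBaseLoop, hget]
        rw [ih tc' (i + 1) _ hdrop (by simpa using hlen)]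
        simp [pvMatches]
        split_ifs <;> ring

theorem pvMainLoop_eq (bF cF : List Char) (ta tb tc : List Char) (i : Nat)
    (pre high pos : Int)
    (htb : tb = bF.drop i) (htc : tc = cF.drop i)
    (hab : ta.length = tb.length) (hbc : tb.length = tc.length) :
    (pvMainLoop bF cF ta i (pre + pvMatches (tb.zip tc), high, pos)).2.2
      = pvScan (ta.zip tc) (pvMkSuffix (tb.zip tc)).tail pre high pos i := by
  induction ta generalizing tb tc i pre high pos with
  | nil => simp [pvMainLoop, pvScan]
  | cons ch ra ih =>
      match tb, tc, hab, hbc with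
      | cb :: rb, cc :: rc, hab, hbc =>
        have hgetb : bF.getD i ' ' = cb := by
          have : bF[i]? = some cb := by
            have h0 : (bF.drop i)[0]? = some cb := by rw [← htb]; rfl
            rw [List.getElem?_drop] at h0; simpa using h0
          simp [List.getD, this]
        have hgetc : cF.getD i ' ' = cc := by
          have : cF[i]? = some cc := by
            have h0 : (cF.drop i)[0]? = some cc := by rw [← htc]; rfl
            rw [List.getElem?_drop] at h0; simpa using h0
          simp [List.getD, this]
        have hdropb : rb = bF.drop (i + 1) := by
          rw [← List.tail_drop, ← htb, List.tail_cons]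
        have hdropc : rc = cF.drop (i + 1) := by
          rw [← List.tail_drop, ← htc, List.tail_cons]
        have hM : pvMatches ((cb, cc) :: rb.zip rc)
            = (if cb == cc then (1:Int) else 0) + pvMatches (rb.zip rc) := by
          simp [pvMatches]
        -- the two state updates of A collapse to pre + matchA + matches(rest)
        have hbase2 :
            (if ch == cF.getD i ' ' then
                (if bF.getD i ' ' == cF.getD i ' ' then
                    (pre + pvMatches (((cb, cc) :: rb.zip rc))) - 1
                  else pre + pvMatches (((cb, cc) :: rb.zip rc))) + 1
              else
                (if bF.getD i ' ' == cF.getD i ' ' then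
                    (pre + pvMatches (((cb, cc) :: rb.zip rc))) - 1
                  else pre + pvMatches (((cb, cc) :: rb.zip rc))))
            = (pre + (if ch == cc then 1 else 0)) + pvMatches (rb.zip rc) := by
          rw [hgetb, hgetc, hM]
          split_ifs <;> ring
        simp only [pvMainLoop, pvScan, List.zip_cons_cons]
        rw [hbase2]
        have hsufhead : ((pvMkSuffix ((cb, cc) :: rb.zip rc)).tail).headI = pvMatches (rb.zip rc) := by
          simp [pvMkSuffix, pvMkSuffix_headI]
        have hsuftail : ((pvMkSuffix ((cb, cc) :: rb.zip rc)).tail).tail = (pvMkSuffix (rb.zip rc)).tail := by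
          simp [pvMkSuffix]
        simp only [hsufhead, hsuftail]
        by_cases hge : (pre + (if ch == cc then (1:Int) else 0)) + pvMatches (rb.zip rc) ≥ high
        · simp only [if_pos hge]
          rw [ih rb rc (i + 1) _ _ _ hdropb hdropc (by simpa using hab) (by simpa using hbc)]
        · simp only [if_neg hge]
          rw [ih rb rc (i + 1) _ _ _ hdropb hdropc (by simpa using hab) (by simpa using hbc)]

-- ===== VERDICT (by name: the statement is the Claim_ definition above) =====
theorem calculate_split_spec : Claim_equal_calculate_split := by
  intro A B C _hdom hpre
  obtain ⟨ha, hb, hov, hc⟩ := hpre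
  unfold pvFirstND pvLastND at hov
  unfold pvLastND at hc
  have hja : A.toList.reverse.findIdx (fun c => c != '-') < A.toList.length := by
    have h1 := (List.findIdx_lt_length (p := fun c => c != '-') (xs := A.toList.reverse))
    simp only [List.length_reverse] at h1
    rw [h1]
    simpa using ha
  have hjb : B.toList.reverse.findIdx (fun c => c != '-') < B.toList.length := by
    have h1 := (List.findIdx_lt_length (p := fun c => c != '-') (xs := B.toList.reverse))
    simp only [List.length_reverse] at h1
    rw [h1]
    simpa using hb
  have hSA := pvGseStart_eq A.toList 0
  rw [if_pos ha] at hSA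
  have hSB := pvGseStart_eq B.toList 0
  rw [if_pos hb] at hSB
  have hEA := pvGseEnd_eq A.toList
  rw [if_pos ha] at hEA
  have hEB := pvGseEnd_eq B.toList
  rw [if_pos hb] at hEB
  have hBA : pvBoundsB A.toList
      = some ((A.toList.findIdx (fun c => c != '-') : Int),
              ((A.toList.length - 1 - A.toList.reverse.findIdx (fun c => c != '-') : Nat) : Int)) := by
    have hH := pvPositions_head A.toList 0
    rw [if_pos ha] at hH
    have hL := pvPositions_getLast A.toList
    rw [if_pos ha] at hL
    unfold pvBoundsB
    unfold pvPositions at hL ⊢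
    rw [hH, hL]
    simp only [Option.bind_some, Option.map_some, Option.some.injEq, Prod.mk.injEq]
    constructor
    · simp
    · omega
  have hBB : pvBoundsB B.toList
      = some ((B.toList.findIdx (fun c => c != '-') : Int),
              ((B.toList.length - 1 - B.toList.reverse.findIdx (fun c => c != '-') : Nat) : Int)) := by
    have hH := pvPositions_head B.toList 0
    rw [if_pos hb] at hH
    have hL := pvPositions_getLast B.toList
    rw [if_pos hb] at hL
    unfold pvBoundsB
    unfold pvPositions at hL ⊢
    rw [hH, hL]
    simp only [Option.bind_some, Option.map_some, Option.some.injEq, Prod.mk.injEq]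
    constructor
    · simp
    · omega
  unfold Spec_calculate_split calculate_split calculate_split_alt
  simp only [hSA, hSB, hEA, hEB, hBA, hBB, Nat.zero_add, Option.elim_some]
  set fa := List.findIdx (fun c => c != '-') A.toList with hfa
  set fb := List.findIdx (fun c => c != '-') B.toList with hfb
  set ea := A.toList.length - 1 - List.findIdx (fun c => c != '-') A.toList.reverse with hea
  set eb := B.toList.length - 1 - List.findIdx (fun c => c != '-') B.toList.reverse with heb
  rw [if_neg (by push_cast; omega)]
  simp only [← Nat.cast_max, ← Nat.cast_min, ← Nat.cast_add_one, PySem.List.slice_natCast]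
  set S := max fa fb with hS
  set E := min ea eb with hE
  set aOv := (A.toList.drop S).take (E + 1 - S) with haOv
  set bOv := (B.toList.drop S).take (E + 1 - S) with hbOv
  set cOv := (C.toList.drop S).take (E + 1 - S) with hcOv
  have hlenA : aOv.length = E + 1 - S := by
    rw [haOv]
    simp only [List.length_take, List.length_drop]
    omega
  have hlenB : bOv.length = E + 1 - S := by
    rw [hbOv]
    simp only [List.length_take, List.length_drop]
    omega
  have hlenC : cOv.length = E + 1 - S := by
    rw [hcOv]
    simp only [List.length_take, List.length_drop]
    omega
  have hbase := pvBaseLoop_eq cOv bOv cOv 0 0 (List.drop_zero (l := cOv)).symm (by omega)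
  rw [hbase]
  have hmain := pvMainLoop_eq bOv cOv aOv bOv cOv 0 0 (0 + pvMatches (bOv.zip cOv)) 0
    (List.drop_zero (l := bOv)).symm (List.drop_zero (l := cOv)).symm (by omega) (by omega)
  rw [hmain, pvMkSuffix_headI]
  simp
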